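-- pv_equiv track=rewrite | github.com/31788517-ctyqq/sport-lottery-sweeper | backend/scanner/core/router_analyzer.py | _match_route_pattern
-- ===== SOURCE A (Python) =====
-- def _match_route_pattern(pattern: str, route: str) -> bool:
--     """匹配路由模式"""
--     # 简单的匹配逻辑，可以后续改进
--     if pattern == route:
--         return True
--
--     # 处理路径参数差异
--     pattern_parts = pattern.strip("/").split("/")
--     route_parts = route.strip("/").split("/")
--
--     if len(pattern_parts) != len(route_parts):
--         return False
--
--     for p_part, r_part in zip(pattern_parts, route_parts):
--         if p_part.startswith("{") and p_part.endswith("}"):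
--             # 路径参数位置
--             continue
--         if p_part != r_part:
--             return False
--
--     return True
-- ===== SOURCE B (Python) =====
-- def _match_route_pattern(pattern: str, route: str) -> bool:
--     """Two-pointer scan: walk both stripped strings one '/'-segment at a time,
--     never building segment lists."""
--     p = pattern.strip("/")
--     r = route.strip("/")
--     while True:
--         k = p.find("/")
--         m = r.find("/")
--         pseg = p if k < 0 else p[:k]
--         rseg = r if m < 0 else r[:m]
--         if pseg != rseg and not (pseg.startswith("{") and pseg.endswith("}")):
--             return False
--         if k < 0 or m < 0:
--             return k < 0 and m < 0
--         p = p[k + 1:]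
--         r = r[m + 1:]
-- ===== Notes on version B (the rewrite author's own statement) =====
-- stated objective: alternative
-- what changed: A strips both strings, splits them into segment lists, compares lengths and then zips the lists; B never builds segment lists: it walks both stripped strings with a two-pointer scan, slicing off one '/'-delimited segment from each at a time with find('/').
import Mathlib
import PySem

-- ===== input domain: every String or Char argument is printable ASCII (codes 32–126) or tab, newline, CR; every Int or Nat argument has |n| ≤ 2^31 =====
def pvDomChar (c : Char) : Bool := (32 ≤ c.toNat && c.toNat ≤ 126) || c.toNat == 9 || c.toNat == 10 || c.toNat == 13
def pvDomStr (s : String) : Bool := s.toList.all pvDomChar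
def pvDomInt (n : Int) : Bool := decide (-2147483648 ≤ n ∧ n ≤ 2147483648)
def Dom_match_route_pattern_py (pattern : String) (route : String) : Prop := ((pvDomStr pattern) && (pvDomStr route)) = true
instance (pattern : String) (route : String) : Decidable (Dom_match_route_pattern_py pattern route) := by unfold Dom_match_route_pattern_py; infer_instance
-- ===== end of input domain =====

-- B rewrites A's split-into-segment-lists comparison as a two-pointer scan over the
-- stripped strings that consumes one '/'-segment at a time (objective: alternative).

-- ===== PORT A =====
-- the 'for p_part, r_part in zip(...)' loop of A
def aLoop : List (List Char × List Char) → Bool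
  | [] => true
  | (pp, rp) :: rest =>
    if PySem.Chars.startswith pp ['{'] && PySem.Chars.endswith pp ['}'] then aLoop rest
    else if pp ≠ rp then false
    else aLoop rest

def match_route_pattern_py (pattern : String) (route : String) : Bool :=
  if pattern == route then true
  else
    let pattern_parts := PySem.Chars.splitOn (PySem.Chars.stripChars pattern.toList ['/']) ['/']
    let route_parts := PySem.Chars.splitOn (PySem.Chars.stripChars route.toList ['/']) ['/']
    if pattern_parts.length ≠ route_parts.length then false
    else aLoop (pattern_parts.zip route_parts)

-- ===== PORT B =====
-- the 'while True' two-pointer loop of B (recursion = the loop; slices as in Source B)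
def bScan (p r : List Char) : Bool :=
  let k := PySem.Chars.find p ['/']
  let m := PySem.Chars.find r ['/']
  let pseg := if k < 0 then p else PySem.List.slice p none (some k)
  let rseg := if m < 0 then r else PySem.List.slice r none (some m)
  if pseg ≠ rseg ∧ ¬(PySem.Chars.startswith pseg ['{'] = true ∧ PySem.Chars.endswith pseg ['}'] = true) then
    false
  else if h : k < 0 ∨ m < 0 then
    decide (k < 0 ∧ m < 0)
  else
    bScan (PySem.List.slice p (some (k + 1)) none) (PySem.List.slice r (some (m + 1)) none)
termination_by p.length
decreasing_by
  have hk : 0 ≤ PySem.Chars.find p ['/'] := by omega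
  have hne : p ≠ [] := by
    intro hp
    have := PySem.Chars.find_nonneg_iff p ['/'] |>.mp hk
    subst hp
    simp at this
  rw [PySem.List.slice_from p (by omega : (0:Int) ≤ PySem.Chars.find p ['/'] + 1)]
  have : 1 ≤ (PySem.Chars.find p ['/'] + 1).toNat := by omega
  have hlen : 0 < p.length := List.length_pos_iff.mpr hne
  simp only [List.length_drop]
  omega

def match_route_pattern_py_alt (pattern : String) (route : String) : Bool :=
  bScan (PySem.Chars.stripChars pattern.toList ['/']) (PySem.Chars.stripChars route.toList ['/'])

-- ===== PRECONDITION & SPEC =====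
def Spec_match_route_pattern_py (pattern : String) (route : String) (out : Bool) : Prop := out = match_route_pattern_py_alt pattern route
instance (pattern : String) (route : String) (out : Bool) : Decidable (Spec_match_route_pattern_py pattern route out) := by unfold Spec_match_route_pattern_py; infer_instance

-- ===== CLAIM (what is proved, stated in full; the proofs are below) =====
def Claim_equal_match_route_pattern_py : Prop := ∀ (pattern : String) (route : String), Dom_match_route_pattern_py pattern route → Spec_match_route_pattern_py pattern route (match_route_pattern_py pattern route)

-- ===== LEMMAS AND PROOFS =====

-- reference splitter: split a char list on '/'
def mySplit : List Char → List (List Char)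
  | [] => [[]]
  | c :: t => if c = '/' then [] :: mySplit t else (mySplit t).modifyHead (c :: ·)

-- one segment comparison as both programs decide it
def segOK (p r : List Char) : Bool :=
  p == r || (PySem.Chars.startswith p ['{'] && PySem.Chars.endswith p ['}'])

-- reference simultaneous segment matcher
def matchSegs : List (List Char) → List (List Char) → Bool
  | [], [] => true
  | [], _ :: _ => false
  | _ :: _, [] => false
  | p :: ps, r :: rs => segOK p r && matchSegs ps rs

theorem mySplit_ne_nil (s : List Char) : mySplit s ≠ [] := by
  induction s with
  | nil => simp [mySplit]
  | cons c t ih =>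
    simp only [mySplit]
    split_ifs
    · simp
    · cases h : mySplit t with
      | nil => exact absurd h ih
      | cons a b => simp [List.modifyHead]

theorem splitOn_go_eq : ∀ (fuel : Nat) (l cur : List Char) (acc : List (List Char)),
    l.length < fuel →
    PySem.Chars.splitOn.go ['/'] fuel l cur acc
      = acc.reverse ++ (mySplit l).modifyHead (cur.reverse ++ ·) := by
  intro fuel
  induction fuel with
  | zero => intro l cur acc h; omega
  | succ n ih =>
    intro l cur acc h
    cases l with
    | nil => simp [PySem.Chars.splitOn.go, mySplit]
    | cons c rest =>
      by_cases hc : c = '/'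
      · subst hc
        rw [show PySem.Chars.splitOn.go ['/'] (n+1) ('/' :: rest) cur acc
              = PySem.Chars.splitOn.go ['/'] n (List.drop 1 ('/' :: rest)) [] (cur.reverse :: acc) by
            simp [PySem.Chars.splitOn.go, List.isPrefixOf]]
        rw [ih _ _ _ (by simpa using Nat.lt_of_succ_lt_succ h)]
        simp [mySplit]
        cases hms : mySplit rest with
        | nil => exact absurd hms (mySplit_ne_nil rest)
        | cons a b => simp [List.modifyHead]
      · rw [show PySem.Chars.splitOn.go ['/'] (n+1) (c :: rest) cur acc
              = PySem.Chars.splitOn.go ['/'] n rest (c :: cur) acc by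
            simp [PySem.Chars.splitOn.go, List.isPrefixOf, (show ¬ '/' = c from fun e => hc e.symm)]]
        rw [ih _ _ _ (by simpa using Nat.lt_of_succ_lt_succ h)]
        simp only [mySplit, if_neg hc]
        cases hms : mySplit rest with
        | nil => exact absurd hms (mySplit_ne_nil rest)
        | cons a b => simp [List.modifyHead]

theorem splitOn_slash (s : List Char) : PySem.Chars.splitOn s ['/'] = mySplit s := by
  rw [PySem.Chars.splitOn, splitOn_go_eq (s.length + 1) s [] [] (by omega)]
  cases hms : mySplit s with
  | nil => exact absurd hms (mySplit_ne_nil s)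
  | cons a b => simp [List.modifyHead]

theorem mySplit_no_slash (s : List Char) (h : '/' ∉ s) : mySplit s = [s] := by
  induction s with
  | nil => simp [mySplit]
  | cons c t ih =>
    simp only [List.mem_cons, not_or] at h
    rw [mySplit, if_neg (show ¬ c = '/' from fun e => h.1 e.symm), ih h.2, List.modifyHead]

theorem mySplit_append (a b : List Char) (h : '/' ∉ a) :
    mySplit (a ++ '/' :: b) = a :: mySplit b := by
  induction a with
  | nil => simp [mySplit]
  | cons c t ih =>
    simp only [List.mem_cons, not_or] at h
    rw [List.cons_append, mySplit, if_neg (show ¬ c = '/' from fun e => h.1 e.symm), ih h.2, List.modifyHead]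

theorem matchSegs_refl (l : List (List Char)) : matchSegs l l = true := by
  induction l with
  | nil => rfl
  | cons a t ih => simp [matchSegs, segOK, ih]

theorem aLoop_zip (ps rs : List (List Char)) (h : ps.length = rs.length) :
    aLoop (ps.zip rs) = matchSegs ps rs := by
  induction ps generalizing rs with
  | nil =>
    cases rs with
    | nil => rfl
    | cons r t => simp at h
  | cons p pt ih =>
    cases rs with
    | nil => simp at h
    | cons r rt =>
      simp only [List.length_cons, Nat.add_right_cancel_iff] at h
      simp only [List.zip_cons_cons, aLoop, matchSegs, segOK, ih rt h]
      by_cases hw : (PySem.Chars.startswith p ['{'] && PySem.Chars.endswith p ['}']) = true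
      · simp [hw]
      · by_cases he : p = r
        · simp [he]
        · simp [he, hw]

theorem matchSegs_len (ps rs : List (List Char)) (h : ps.length ≠ rs.length) :
    matchSegs ps rs = false := by
  induction ps generalizing rs with
  | nil => cases rs with
    | nil => simp at h
    | cons r t => rfl
  | cons p pt ih =>
    cases rs with
    | nil => rfl
    | cons r rt =>
      simp only [List.length_cons, ne_eq, Nat.add_right_cancel_iff] at h
      simp [matchSegs, ih rt h]

-- find p ['/'] ≥ 0 decomposes p at its FIRST slash
theorem find_slash_decomp (p : List Char) (h : 0 ≤ PySem.Chars.find p ['/']) :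
    let j := (PySem.Chars.find p ['/']).toNat
    j < p.length ∧ p = p.take j ++ '/' :: p.drop (j + 1) ∧ '/' ∉ p.take j := by
  intro j
  obtain ⟨hpre, hmin⟩ := PySem.Chars.find_spec h
  have hdrop : p.drop j ≠ [] := by
    intro hd
    rw [hd] at hpre
    exact absurd (List.eq_nil_of_prefix_nil hpre) (by simp)
  have hj : j < p.length := by
    by_contra hge
    exact hdrop (List.drop_eq_nil_of_le (by omega))
  refine ⟨hj, ?_, ?_⟩
  · have hget : p[j] = '/' := by
      rcases hpre with ⟨t, ht⟩
      rw [List.drop_eq_getElem_cons hj] at ht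
      exact (List.cons_eq_cons.mp ht).1.symm
    conv_lhs => rw [← List.take_append_drop j p]
    rw [List.drop_eq_getElem_cons hj, hget]
  · intro hmem
    obtain ⟨i, hi, hget⟩ := List.mem_iff_getElem.mp hmem
    have hil : i < j := by
      have := hi
      simp [List.length_take] at this
      omega
    apply hmin i hil
    have hip : i < p.length := by omega
    refine ⟨p.drop (i + 1), ?_⟩
    rw [List.drop_eq_getElem_cons hip]
    have : p[i] = '/' := by
      have := hget
      rwa [List.getElem_take] at this
    rw [this]
    rfl


theorem segOK_iff (p r : List Char) :
    (¬(p ≠ r ∧ ¬(PySem.Chars.startswith p ['{'] = true ∧ PySem.Chars.endswith p ['}'] = true)))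
      ↔ segOK p r = true := by
  simp [segOK]
  tauto

theorem segOK_holds {p r : List Char} (h : ¬ segOK p r = true) :
    p ≠ r ∧ ¬(PySem.Chars.startswith p ['{'] = true ∧ PySem.Chars.endswith p ['}'] = true) := by
  by_contra hC
  exact h ((segOK_iff p r).mp hC)

theorem find_slash_neg {p : List Char} (h : PySem.Chars.find p ['/'] < 0) : '/' ∉ p := by
  have hni : ¬ ['/'] <:+: p := by
    rw [← PySem.Chars.find_eq_neg_one_iff]
    have := PySem.Chars.neg_one_le_find p ['/']
    omega
  simpa [List.singleton_infix_iff] using hni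

-- the split of mySplit at the first slash, as an equation usable by rw
theorem mySplit_decomp (p : List Char) (h : 0 ≤ PySem.Chars.find p ['/']) :
    mySplit p = p.take (PySem.Chars.find p ['/']).toNat
      :: mySplit (p.drop ((PySem.Chars.find p ['/']).toNat + 1)) := by
  obtain ⟨hj, hdec, hnot⟩ := find_slash_decomp p h
  conv_lhs => rw [hdec]
  exact mySplit_append _ _ hnot

-- no-recursion case: neither string contains a slash
theorem bScan_case_nn (p r : List Char) (hk : PySem.Chars.find p ['/'] < 0)
    (hm : PySem.Chars.find r ['/'] < 0) :
    bScan p r = matchSegs (mySplit p) (mySplit r) := by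
  rw [bScan, mySplit_no_slash p (find_slash_neg hk), mySplit_no_slash r (find_slash_neg hm)]
  simp only [if_pos hk, if_pos hm]
  by_cases hok : segOK p r = true
  · rw [if_neg ((segOK_iff p r).mpr hok), dif_pos (Or.inl hk),
        decide_eq_true (show _ ∧ _ from ⟨hk, hm⟩)]
    simp [matchSegs, hok]
  · rw [if_pos (segOK_holds hok)]
    simp [matchSegs, hok]

-- no-recursion case: p has no slash, r does (segment counts differ)
theorem bScan_case_nr (p r : List Char) (hk : PySem.Chars.find p ['/'] < 0)
    (hm : 0 ≤ PySem.Chars.find r ['/']) :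
    bScan p r = matchSegs (mySplit p) (mySplit r) := by
  rw [bScan, mySplit_no_slash p (find_slash_neg hk), mySplit_decomp r hm]
  simp only [if_pos hk, if_neg (not_lt.mpr hm), PySem.List.slice_to r hm]
  have hR : matchSegs [p]
      ((r.take (PySem.Chars.find r ['/']).toNat)
        :: mySplit (r.drop ((PySem.Chars.find r ['/']).toNat + 1))) = false := by
    cases hms : mySplit (r.drop ((PySem.Chars.find r ['/']).toNat + 1)) with
    | nil => exact absurd hms (mySplit_ne_nil _)
    | cons a t => simp [matchSegs]
  rw [hR]
  by_cases hok : segOK p (r.take (PySem.Chars.find r ['/']).toNat) = true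
  · rw [if_neg ((segOK_iff _ _).mpr hok), dif_pos (Or.inl hk), decide_eq_false_iff_not]
    omega
  · rw [if_pos (segOK_holds hok)]

-- no-recursion case: r has no slash, p does (segment counts differ)
theorem bScan_case_rn (p r : List Char) (hk : 0 ≤ PySem.Chars.find p ['/'])
    (hm : PySem.Chars.find r ['/'] < 0) :
    bScan p r = matchSegs (mySplit p) (mySplit r) := by
  rw [bScan, mySplit_no_slash r (find_slash_neg hm), mySplit_decomp p hk]
  simp only [if_pos hm, if_neg (not_lt.mpr hk), PySem.List.slice_to p hk]
  have hR : matchSegs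
      ((p.take (PySem.Chars.find p ['/']).toNat)
        :: mySplit (p.drop ((PySem.Chars.find p ['/']).toNat + 1))) [r] = false := by
    cases hms : mySplit (p.drop ((PySem.Chars.find p ['/']).toNat + 1)) with
    | nil => exact absurd hms (mySplit_ne_nil _)
    | cons a t => simp [matchSegs]
  rw [hR]
  by_cases hok : segOK (p.take (PySem.Chars.find p ['/']).toNat) r = true
  · rw [if_neg ((segOK_iff _ _).mpr hok), dif_pos (Or.inr hm), decide_eq_false_iff_not]
    omega
  · rw [if_pos (segOK_holds hok)]

theorem bScan_eq_matchSegs : ∀ (n : Nat) (p r : List Char), p.length ≤ n →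
    bScan p r = matchSegs (mySplit p) (mySplit r) := by
  intro n
  induction n with
  | zero =>
    intro p r hn
    have hp : p = [] := List.eq_nil_of_length_eq_zero (by omega)
    subst hp
    have hk : PySem.Chars.find [] ['/'] < 0 := by decide
    by_cases hm : PySem.Chars.find r ['/'] < 0
    · exact bScan_case_nn [] r hk hm
    · exact bScan_case_nr [] r hk (by omega)
  | succ n ih =>
    intro p r hn
    by_cases hk : PySem.Chars.find p ['/'] < 0
    · by_cases hm : PySem.Chars.find r ['/'] < 0
      · exact bScan_case_nn p r hk hm
      · exact bScan_case_nr p r hk (by omega)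
    · rw [not_lt] at hk
      by_cases hm : PySem.Chars.find r ['/'] < 0
      · exact bScan_case_rn p r hk hm
      · rw [not_lt] at hm
        obtain ⟨hjp, -, -⟩ := find_slash_decomp p hk
        rw [bScan, mySplit_decomp p hk, mySplit_decomp r hm]
        simp only [if_neg (not_lt.mpr hk), if_neg (not_lt.mpr hm),
          PySem.List.slice_to p hk, PySem.List.slice_to r hm]
        rw [dif_neg (show ¬(PySem.Chars.find p ['/'] < 0 ∨ PySem.Chars.find r ['/'] < 0) from by omega)]
        rw [PySem.List.slice_from p (by omega : (0:Int) ≤ PySem.Chars.find p ['/'] + 1),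
            PySem.List.slice_from r (by omega : (0:Int) ≤ PySem.Chars.find r ['/'] + 1)]
        rw [show (PySem.Chars.find p ['/'] + 1).toNat = (PySem.Chars.find p ['/']).toNat + 1 from by omega,
            show (PySem.Chars.find r ['/'] + 1).toNat = (PySem.Chars.find r ['/']).toNat + 1 from by omega]
        rw [ih _ _ (by simp only [List.length_drop]; omega)]
        by_cases hok : segOK (p.take (PySem.Chars.find p ['/']).toNat)
            (r.take (PySem.Chars.find r ['/']).toNat) = true
        · rw [if_neg ((segOK_iff _ _).mpr hok)]
          simp [matchSegs, hok]
        · rw [if_pos (segOK_holds hok)]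
          simp [matchSegs, hok]

-- ===== VERDICT (by name: the statement is the Claim_ definition above) =====
theorem match_route_pattern_py_spec : Claim_equal_match_route_pattern_py := by
  intro pattern route _
  unfold Spec_match_route_pattern_py
  unfold match_route_pattern_py match_route_pattern_py_alt
  rw [splitOn_slash, splitOn_slash,
      bScan_eq_matchSegs ((PySem.Chars.stripChars pattern.toList ['/']).length) _ _ (le_refl _)]
  by_cases he : pattern = route
  · subst he
    rw [if_pos (show (pattern == pattern) = true from beq_iff_eq.mpr rfl)]
    exact (matchSegs_refl _).symm
  · rw [if_neg (show ¬ (pattern == route) = true from by simpa using he)]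
    by_cases hl : (mySplit (PySem.Chars.stripChars pattern.toList ['/'])).length
        = (mySplit (PySem.Chars.stripChars route.toList ['/'])).length
    · rw [if_neg (not_ne_iff.mpr hl)]
      exact aLoop_zip _ _ hl
    · rw [if_pos hl]
      exact (matchSegs_len _ _ hl).symm
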